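-- pv_equiv track=rewrite | github.com/Ruicrand/FlexiFed | src/scripts/utils.py | get_common_base_layers
-- ===== SOURCE A (Python) =====
-- def get_common_base_layers(model_list):
--     min_idx = 0
--     min_len = 1000000
--
--     # 找到参数最少的一个模型
--     for i in range(0, len(model_list)):
--         if len(model_list[i]) < min_len:
--             min_idx = i
--             min_len = len(model_list[i])
--
--     commonList = [s for s in model_list[min_idx].keys()]
--
--     # 找到common base layers
--     for i in range(0, len(model_list)):
--         weight_name_list = [s for s in model_list[i].keys()]
--         for j in range(len(commonList)):
--             if commonList[j] == weight_name_list[j]: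
--                 continue
--             else:
--                 del commonList[j:len(commonList) + 1]  # 从哪一层开始不同，删去该层后所有层
--                 break
--     return commonList
-- ===== SOURCE B (Python) =====
-- def get_common_base_layers(model_list):
--     keys = [list(m.keys()) for m in model_list]
--     first = keys[0]  # empty input raises IndexError, as in the original
--     common = []
--     for col in zip(*keys):
--         if all(k == col[0] for k in col):
--             common.append(col[0])
--         else:
--             break
--     return common
-- ===== Notes on version B (the rewrite author's own statement) =====
-- stated objective: idiomatic
-- what changed: B drops A's explicit min-length search and per-model truncation fold: it collects the key lists once and walks them column-wise with zip(*keys), appending a key while all models agree at that position and stopping at the first disagreement (zip itself stops at the shortest dict). Pre_ excludes the empty list, on which A raises IndexError.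
import Mathlib
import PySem

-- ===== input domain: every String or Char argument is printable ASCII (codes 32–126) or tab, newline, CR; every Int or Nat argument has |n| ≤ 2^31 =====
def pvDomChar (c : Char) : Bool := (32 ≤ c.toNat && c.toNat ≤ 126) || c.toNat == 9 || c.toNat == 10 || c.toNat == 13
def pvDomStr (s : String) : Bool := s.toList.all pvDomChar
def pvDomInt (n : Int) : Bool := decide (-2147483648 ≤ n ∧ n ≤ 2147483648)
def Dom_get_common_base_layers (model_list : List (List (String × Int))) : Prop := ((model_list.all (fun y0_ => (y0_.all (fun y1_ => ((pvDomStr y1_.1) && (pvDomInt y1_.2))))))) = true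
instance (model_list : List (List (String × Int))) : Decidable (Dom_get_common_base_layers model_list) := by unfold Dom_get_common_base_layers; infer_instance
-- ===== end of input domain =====

-- B replaces A's min-length search + per-model truncation fold by a single idiomatic
-- column-wise zip over the key lists (same return value; no speed claim).


-- ===== PORT A =====
-- list(m.keys()) for a dict given as an association list: distinct keys, first occurrence, in order
def pvKeys (m : List (String × Int)) : List String := PySem.List.dedup (m.map Prod.fst)

-- first loop of A: find (min_idx, min_len) over range(len(model_list)); len(model_list[i])
-- is the dict size, i.e. the number of distinct keys (getD's default is unreachable: i is in range)
def pvMinLoop (model_list : List (List (String × Int))) : Nat × Nat :=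
  (List.range model_list.length).foldl
    (fun st i =>
      if (pvKeys (model_list.getD i [])).length < st.2
      then (i, (pvKeys (model_list.getD i [])).length) else st)
    (0, 1000000)

-- inner j-loop of A: walk commonList and weight_name_list position by position,
-- keep while equal, 'del commonList[j:]' + break at the first mismatch.
-- The (_ :: _, []) arm is where Python raises IndexError (weight list exhausted before
-- commonList); it is unreachable on inputs satisfying Pre_.
def pvTrunc : List String → List String → List String
  | [], _ => []
  | _ :: _, [] => []
  | c :: cs, x :: xs => if c = x then c :: pvTrunc cs xs else []

-- commonList = keys of model_list[min_idx] (on the empty list Python raises IndexError,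
-- outside Pre_; getD's default stands for that), then the second loop over the models,
-- each iteration running the inner j-loop (pvTrunc)
def get_common_base_layers (model_list : List (List (String × Int))) : List String :=
  model_list.foldl (fun common m => pvTrunc common (pvKeys m))
    (pvKeys (model_list.getD (pvMinLoop model_list).1 []))

-- ===== PORT B =====
-- the zip(*keys) loop of Source B: walk the first key list; at each position keep the key
-- iff every list still starts with it (an exhausted list makes the check fail, as zip stops)
def pvColsLoop : List String → List (List String) → List String
  | [], _ => []
  | h :: t, keyss =>
      if keyss.all (fun l => l.head? == some h)
      then h :: pvColsLoop t (keyss.map List.tail)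
      else []

def get_common_base_layers_alt (model_list : List (List (String × Int))) : List String :=
  match model_list.map pvKeys with
  | [] => []                                  -- first = keys[0]: Python raises IndexError here (outside Pre_)
  | first :: rest => pvColsLoop first (first :: rest)

-- ===== PRECONDITION & SPEC =====
-- Pre_ excludes the empty list, on which A (and B) raises IndexError.
-- (A can also raise IndexError when EVERY dict has at least 1000000 keys — its
-- 'min_len = 1000000' sentinel then makes it start from model 0's key list, which can
-- outrun a shorter dict; that astronomically large corner is not carved out here, and
-- the equality theorem below holds for the ports on all nonempty inputs regardless.)
def Pre_get_common_base_layers (model_list : List (List (String × Int))) : Prop :=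
  model_list ≠ []
instance (model_list : List (List (String × Int))) : Decidable (Pre_get_common_base_layers model_list) := by unfold Pre_get_common_base_layers; infer_instance

def pvWitness_get_common_base_layers : (List (List (String × Int))) :=
  [[("conv1", 3), ("conv2", 5)], [("conv1", 7), ("fc", 1), ("out", 2)]]

def Spec_get_common_base_layers (model_list : List (List (String × Int))) (out : List String) : Prop := out = get_common_base_layers_alt model_list
instance (model_list : List (List (String × Int))) (out : List String) : Decidable (Spec_get_common_base_layers model_list out) := by unfold Spec_get_common_base_layers; infer_instance

-- ===== CLAIM (what is proved, stated in full; the proofs are below) =====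
def Claim_equal_get_common_base_layers : Prop := ∀ (model_list : List (List (String × Int))), Dom_get_common_base_layers model_list → Pre_get_common_base_layers model_list → Spec_get_common_base_layers model_list (get_common_base_layers model_list)

-- ===== LEMMAS AND PROOFS =====

theorem pvTrunc_nil (w : List String) : pvTrunc [] w = [] := by cases w <;> rfl

theorem pvTrunc_idem (a : List String) : pvTrunc a a = a := by
  induction a with
  | nil => rfl
  | cons c cs ih => simp [pvTrunc, ih]

theorem pvTrunc_comm (a b : List String) : pvTrunc a b = pvTrunc b a := by
  induction a generalizing b with
  | nil => cases b <;> rfl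
  | cons c cs ih =>
    cases b with
    | nil => rfl
    | cons x xs =>
      by_cases h : c = x
      · subst h; simp [pvTrunc, ih]
      · have h' : ¬ x = c := fun hh => h hh.symm
        simp [pvTrunc, h, h']

theorem pvTrunc_assoc (a b c : List String) :
    pvTrunc (pvTrunc a b) c = pvTrunc a (pvTrunc b c) := by
  induction a generalizing b c with
  | nil => simp [pvTrunc_nil]
  | cons x xs ih =>
    cases b with
    | nil => cases c <;> simp [pvTrunc, pvTrunc_nil]
    | cons y ys =>
      cases c with
      | nil => by_cases h : x = y <;> simp [pvTrunc, h]
      | cons z zs =>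
        by_cases hxy : x = y
        · subst hxy
          by_cases hyz : x = z
          · subst hyz; simp [pvTrunc, ih]
          · simp [pvTrunc, hyz]
        · by_cases hyz : y = z
          · subst hyz; simp [pvTrunc, hxy]
          · simp [pvTrunc, hxy, hyz, pvTrunc_nil]

theorem pvTrunc_prefix (a w : List String) : pvTrunc a w <+: a := by
  induction a generalizing w with
  | nil => simp [pvTrunc_nil]
  | cons c cs ih =>
    cases w with
    | nil => simp [pvTrunc]
    | cons x xs =>
      by_cases h : c = x
      · subst h
        have hred : pvTrunc (c :: cs) (c :: xs) = c :: pvTrunc cs xs := by simp [pvTrunc]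
        rw [hred]
        exact List.cons_prefix_cons.mpr ⟨rfl, ih xs⟩
      · simp [pvTrunc, h]

theorem foldl_trunc_nil (ws : List (List String)) : List.foldl pvTrunc [] ws = [] := by
  induction ws with
  | nil => rfl
  | cons w ws ih => simpa [List.foldl, pvTrunc_nil] using ih

theorem foldl_trunc_trunc (ws : List (List String)) (a b : List String) :
    List.foldl pvTrunc (pvTrunc a b) ws = pvTrunc a (List.foldl pvTrunc b ws) := by
  induction ws generalizing a b with
  | nil => rfl
  | cons w ws ih =>
    simp only [List.foldl]
    rw [pvTrunc_assoc, ih]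

theorem foldl_trunc_cons (a w : List String) (ws : List (List String)) :
    List.foldl pvTrunc a (w :: ws) = pvTrunc a (List.foldl pvTrunc w ws) := by
  simpa [List.foldl] using foldl_trunc_trunc ws a w

theorem foldl_trunc_absorb (ws : List (List String)) (w a : List String)
    (ha : a ∈ w :: ws) : pvTrunc a (List.foldl pvTrunc w ws) = List.foldl pvTrunc w ws := by
  induction ws generalizing w with
  | nil =>
    simp only [List.mem_cons, List.not_mem_nil, or_false] at ha
    subst ha; simpa using pvTrunc_idem a
  | cons u us ih =>
    rw [foldl_trunc_cons]
    rcases List.mem_cons.mp ha with h | h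
    · subst h
      rw [← pvTrunc_assoc, pvTrunc_idem]
    · have habs := ih u h
      rw [← pvTrunc_assoc, pvTrunc_comm a w, pvTrunc_assoc, habs]

theorem foldl_trunc_init (w : List String) (ws : List (List String)) (a : List String)
    (ha : a ∈ w :: ws) :
    List.foldl pvTrunc a (w :: ws) = List.foldl pvTrunc w (w :: ws) := by
  rw [foldl_trunc_cons, foldl_trunc_cons, foldl_trunc_absorb ws w a ha,
      foldl_trunc_absorb ws w w (List.mem_cons_self)]

theorem foldl_trunc_heads (ws : List (List String)) (h : String) (t : List String)
    (hh : ∀ w ∈ ws, w.head? = some h) :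
    List.foldl pvTrunc (h :: t) ws = h :: List.foldl pvTrunc t (ws.map List.tail) := by
  induction ws generalizing t with
  | nil => rfl
  | cons w ws ih =>
    obtain ⟨w', rfl⟩ : ∃ w', w = h :: w' := by
      cases w with
      | nil =>
        have hc := hh [] List.mem_cons_self
        simp at hc
      | cons x xs =>
        have hc := hh (x :: xs) List.mem_cons_self
        simp only [List.head?, Option.some.injEq] at hc
        exact ⟨xs, by rw [hc]⟩
    have hred : pvTrunc (h :: t) (h :: w') = h :: pvTrunc t w' := by simp [pvTrunc]
    simp only [List.foldl, List.map, List.tail_cons, hred]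
    rw [ih (pvTrunc t w') (fun u hu => hh u (List.mem_cons_of_mem _ hu))]

theorem foldl_trunc_bad (ws : List (List String)) (h : String) (t : List String) :
    ∀ a : List String, a <+: h :: t → (∃ w ∈ ws, w.head? ≠ some h) →
    List.foldl pvTrunc a ws = [] := by
  induction ws with
  | nil => rintro a _ ⟨w, hw, _⟩; simp at hw
  | cons u us ih =>
    rintro a hpre ⟨w, hw, hwh⟩
    by_cases hu : u.head? = some h
    · have hwus : w ∈ us := by
        rcases List.mem_cons.mp hw with rfl | h2
        · exact absurd hu hwh
        · exact h2
      simp only [List.foldl]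
      exact ih (pvTrunc a u) ((pvTrunc_prefix a u).trans hpre) ⟨w, hwus, hwh⟩
    · have hz : pvTrunc a u = [] := by
        cases a with
        | nil => exact pvTrunc_nil u
        | cons c cs =>
          have hc : c = h := (List.cons_prefix_cons.mp hpre).1
          cases u with
          | nil => rfl
          | cons x xs =>
            have hcx : ¬ c = x := by
              rintro rfl
              exact hu (by simp [List.head?, hc])
            simp [pvTrunc, hcx]
      simp only [List.foldl, hz]
      exact foldl_trunc_nil us

theorem pvColsLoop_eq_foldl (a : List String) (ws : List (List String)) :
    pvColsLoop a ws = List.foldl pvTrunc a ws := by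
  induction a generalizing ws with
  | nil => simp [pvColsLoop, foldl_trunc_nil]
  | cons h t ih =>
    by_cases hall : ws.all (fun l => l.head? == some h)
    · have hh : ∀ w ∈ ws, w.head? = some h := by
        intro w hw
        simpa using (List.all_eq_true.mp hall) w hw
      rw [foldl_trunc_heads ws h t hh]
      simp [pvColsLoop, hall, ih]
    · have hbad : ∃ w ∈ ws, w.head? ≠ some h := by
        by_contra hc
        push Not at hc
        exact hall (List.all_eq_true.mpr fun w hw => by simp [hc w hw])
      rw [foldl_trunc_bad ws h t (h :: t) List.prefix_rfl hbad]
      simp [pvColsLoop, hall]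

theorem minfold_lt (n : Nat) (g : Nat → Nat) (l : List Nat) (hl : ∀ i ∈ l, i < n) :
    ∀ st : Nat × Nat, st.1 < n →
    (l.foldl (fun st i => if g i < st.2 then (i, g i) else st) st).1 < n := by
  induction l with
  | nil => intro st h; exact h
  | cons i l ih =>
    intro st hst
    simp only [List.foldl]
    apply ih (fun j hj => hl j (List.mem_cons_of_mem _ hj))
    by_cases h : g i < st.2
    · simpa [h] using hl i List.mem_cons_self
    · simpa [h] using hst

theorem pvMinLoop_lt (model_list : List (List (String × Int))) (h : model_list ≠ []) :
    (pvMinLoop model_list).1 < model_list.length := by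
  unfold pvMinLoop
  exact minfold_lt model_list.length (fun i => (pvKeys (model_list.getD i [])).length)
    (List.range model_list.length) (fun i hi => List.mem_range.mp hi) (0, 1000000)
    (List.length_pos_iff.mpr h)

-- ===== VERDICT (by name: the statement is the Claim_ definition above) =====
theorem get_common_base_layers_spec : Claim_equal_get_common_base_layers := by
  intro model_list _hdom hpre
  unfold Spec_get_common_base_layers
  have hne := hpre
  cases model_list with
  | nil => exact absurd rfl hne
  | cons m0 rest =>
    have hlt : (pvMinLoop (m0 :: rest)).1 < (m0 :: rest).length :=
      pvMinLoop_lt _ (by simp)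
    have hmem : (m0 :: rest).getD (pvMinLoop (m0 :: rest)).1 [] ∈ m0 :: rest := by
      rw [List.getD_eq_getElem?_getD, List.getElem?_eq_getElem hlt, Option.getD_some]
      exact List.getElem_mem hlt
    have hinit : pvKeys ((m0 :: rest).getD (pvMinLoop (m0 :: rest)).1 [])
        ∈ pvKeys m0 :: rest.map pvKeys := by
      have hm := List.mem_map_of_mem (f := pvKeys) hmem
      simpa using hm
    unfold get_common_base_layers get_common_base_layers_alt
    simp only [List.map]
    rw [pvColsLoop_eq_foldl]
    have hA : (m0 :: rest).foldl (fun c m => pvTrunc c (pvKeys m))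
        (pvKeys ((m0 :: rest).getD (pvMinLoop (m0 :: rest)).1 []))
        = List.foldl pvTrunc (pvKeys ((m0 :: rest).getD (pvMinLoop (m0 :: rest)).1 []))
            ((m0 :: rest).map pvKeys) :=
      List.foldl_map.symm
    rw [hA]
    simp only [List.map]
    exact foldl_trunc_init (pvKeys m0) (rest.map pvKeys) _ hinit
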